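-- pv_equiv track=rewrite | github.com/Nghia03092004/nghia03092004.github.io | project_euler_unified/problem_834/solution.py | solve_formula_mod
-- ===== SOURCE A (Python) =====
-- def solve_formula_mod(N, mod):
--     """S(N) mod p using the formula."""
--     inv2 = pow(2, mod - 2, mod)
--     sum_n = N % mod * ((N + 1) % mod) % mod * inv2 % mod
--     sum_m = sum_n  # same
--
--     # T = sum 10^{d(m)} for m = 1..N
--     T = 0
--     d = 1
--     while 10**(d-1) <= N:
--         lo = 10**(d-1)
--         hi = min(10**d - 1, N)
--         count = (hi - lo + 1) % mod
--         T = (T + count * pow(10, d, mod)) % mod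
--         d += 1
--
--     return (sum_n * T + N % mod * sum_m) % mod
-- ===== SOURCE B (Python) =====
-- def solve_formula_mod(N, mod):
--     """S(N) mod p using the formula; T in closed form instead of the per-digit-length loop."""
--     inv2 = pow(2, mod - 2, mod)
--     sum_n = N % mod * ((N + 1) % mod) % mod * inv2 % mod
--
--     if N >= 1:
--         D = 1
--         while 10 ** D <= N:
--             D += 1
--         full = 90 * (100 ** (D - 1) - 1) // 99
--         last = (N - 10 ** (D - 1) + 1) * 10 ** D
--         T = (full + last) % mod
--     else:
--         T = 0
--
--     return (sum_n * (T + N % mod)) % mod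
-- ===== Notes on version B (the rewrite author's own statement) =====
-- stated objective: simpler
-- what changed: The per-digit-length modular accumulation loop for T is replaced by a closed form: count the digits D of N, then T = (90*(100**(D-1)-1)//99 + (N-10**(D-1)+1)*10**D) % mod, and the tail collapses to sum_n*(T + N%mod) since sum_m == sum_n.
import Mathlib
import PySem

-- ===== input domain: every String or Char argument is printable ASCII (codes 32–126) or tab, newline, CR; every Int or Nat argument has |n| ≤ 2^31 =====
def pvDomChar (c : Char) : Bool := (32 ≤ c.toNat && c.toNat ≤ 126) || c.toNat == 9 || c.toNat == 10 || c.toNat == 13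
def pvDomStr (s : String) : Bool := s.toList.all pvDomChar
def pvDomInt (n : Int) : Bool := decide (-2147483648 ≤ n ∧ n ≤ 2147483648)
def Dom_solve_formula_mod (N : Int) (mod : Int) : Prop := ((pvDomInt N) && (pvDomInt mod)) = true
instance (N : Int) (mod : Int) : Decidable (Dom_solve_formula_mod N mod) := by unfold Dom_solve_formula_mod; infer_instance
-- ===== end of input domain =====

-- B replaces A's per-digit-length modular accumulation of T by a digit count plus a closed form (objective: simpler).

-- ===== PORT A =====
-- Shared helper: Python's built-in pow(b, e, m) for b = 2, e = m - 2 (m ≠ 0, and 2 invertible mod m when e < 0).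
-- Python's pow with a modulus is binary modular exponentiation; bpow transcribes it (reduce mod m at each squaring step).
def bpow (b : Int) (e : Nat) (m : Int) : Int :=
  if h0 : e = 0 then PySem.Int.mod 1 m
  else
    let r := bpow b (e / 2) m
    if e % 2 = 0 then PySem.Int.mod (r * r) m else PySem.Int.mod (r * r * b) m
termination_by e
decreasing_by exact Nat.div_lt_self (Nat.pos_of_ne_zero h0) (by omega)

-- pow(2, m - 2, m): for m ≥ 2 directly; for m < 2 Python inverts the base mod |m| first
-- (the inverse of 2 mod an odd |m| is (|m|+1)/2; for |m| = 1 everything is 0) and re-signs with m.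
def pyPow2Inv (m : Int) : Int :=
  if 0 ≤ m - 2 then bpow 2 (m - 2).toNat m
  else PySem.Int.mod (bpow (((m.natAbs + 1) / 2 : Nat) : Int) (2 - m).toNat (m.natAbs : Int)) m

-- A's while-loop over digit lengths; Python's d is represented as e = d - 1 (so 10**(d-1) is 10^e).
def loopT (N m : Int) (e : Nat) (T : Int) : Int :=
  if h : (10:Int) ^ e ≤ N then
    loopT N m (e + 1)
      (PySem.Int.mod (T + PySem.Int.mod (min ((10:Int) ^ (e + 1) - 1) N - (10:Int) ^ e + 1) m * PySem.Int.powMod 10 (e + 1) m) m)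
  else T
termination_by (N + 1 - (10:Int) ^ e).toNat
decreasing_by
  have h1 : (1:Int) ≤ (10:Int) ^ e := one_le_pow₀ (by norm_num)
  have h2 : (10:Int) ^ (e + 1) = 10 * (10:Int) ^ e := by ring
  omega

def solve_formula_mod (N : Int) (mod : Int) : Int :=
  let inv2 := pyPow2Inv mod
  let sum_n := PySem.Int.mod (PySem.Int.mod (PySem.Int.mod N mod * PySem.Int.mod (N + 1) mod) mod * inv2) mod
  let sum_m := sum_n
  let T := loopT N mod 0 0
  PySem.Int.mod (sum_n * T + PySem.Int.mod N mod * sum_m) mod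

-- ===== PORT B =====
-- B's digit-count loop: while 10 ** D <= N: D += 1
def loopD (N : Int) (D : Nat) : Nat :=
  if _h : (10:Int) ^ D ≤ N then loopD N (D + 1) else D
termination_by (N + 1 - (10:Int) ^ D).toNat
decreasing_by
  have h1 : (1:Int) ≤ (10:Int) ^ D := one_le_pow₀ (by norm_num)
  have h2 : (10:Int) ^ (D + 1) = 10 * (10:Int) ^ D := by ring
  omega

def solve_formula_mod_alt (N : Int) (mod : Int) : Int :=
  let inv2 := pyPow2Inv mod
  let sum_n := PySem.Int.mod (PySem.Int.mod (PySem.Int.mod N mod * PySem.Int.mod (N + 1) mod) mod * inv2) mod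
  let T :=
    if 1 ≤ N then
      let D := loopD N 1
      let full := PySem.Int.floordiv (90 * ((100:Int) ^ (D - 1) - 1)) 99
      let last := (N - (10:Int) ^ (D - 1) + 1) * (10:Int) ^ D
      PySem.Int.mod (full + last) mod
    else 0
  PySem.Int.mod (sum_n * (T + PySem.Int.mod N mod)) mod

-- ===== PRECONDITION & SPEC =====
-- Python's A raises exactly when mod = 0 (pow with zero modulus, ValueError) or mod < 0 and even
-- (pow(2, mod-2, mod) needs the inverse of 2 mod |mod|, ValueError); those inputs are excluded.
def Pre_solve_formula_mod (N : Int) (mod : Int) : Prop :=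
  mod ≠ 0 ∧ (0 < mod ∨ PySem.Int.mod mod 2 = 1)
instance (N : Int) (mod : Int) : Decidable (Pre_solve_formula_mod N mod) := by
  unfold Pre_solve_formula_mod; infer_instance

def pvWitness_solve_formula_mod : Int × Int := (834, 7)

def Spec_solve_formula_mod (N : Int) (mod : Int) (out : Int) : Prop := out = solve_formula_mod_alt N mod
instance (N : Int) (mod : Int) (out : Int) : Decidable (Spec_solve_formula_mod N mod out) := by
  unfold Spec_solve_formula_mod; infer_instance

-- ===== CLAIM (what is proved, stated in full; the proofs are below) =====
def Claim_equal_solve_formula_mod : Prop := ∀ (N : Int) (mod : Int), Dom_solve_formula_mod N mod → Pre_solve_formula_mod N mod → Spec_solve_formula_mod N mod (solve_formula_mod N mod)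

-- ===== LEMMAS AND PROOFS =====

-- PySem.Int.mod m reduces to a representative of the same class mod m.
lemma pymod_modEq (x m : Int) : Int.ModEq m (PySem.Int.mod x m) x := by
  have h := PySem.Int.floordiv_mul_add_mod x m
  exact Int.modEq_iff_dvd.mpr ⟨PySem.Int.floordiv x m, by linarith⟩

-- Congruent values have equal Python mods (m ≠ 0).
lemma pymod_congr {x y m : Int} (hm : m ≠ 0) (h : Int.ModEq m x y) :
    PySem.Int.mod x m = PySem.Int.mod y m := by
  have hxy : Int.ModEq m (PySem.Int.mod x m) (PySem.Int.mod y m) :=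
    ((pymod_modEq x m).trans h).trans (pymod_modEq y m).symm
  have hd : m ∣ PySem.Int.mod y m - PySem.Int.mod x m := Int.modEq_iff_dvd.mp hxy
  have hd' : |m| ∣ PySem.Int.mod y m - PySem.Int.mod x m := (abs_dvd m _).mpr hd
  have hbound : |PySem.Int.mod y m - PySem.Int.mod x m| < |m| := by
    rcases lt_trichotomy m 0 with hlt | hz | hgt
    · have b1 := PySem.Int.mod_neg_bounds (a := x) hlt
      have b2 := PySem.Int.mod_neg_bounds (a := y) hlt
      rcases abs_cases (PySem.Int.mod y m - PySem.Int.mod x m) with ⟨he, _⟩ | ⟨he, _⟩ <;>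
        rcases abs_cases m with ⟨hm2, _⟩ | ⟨hm2, _⟩ <;> omega
    · exact absurd hz hm
    · have b1l := PySem.Int.mod_nonneg (a := x) hgt
      have b1u := PySem.Int.mod_lt (a := x) hgt
      have b2l := PySem.Int.mod_nonneg (a := y) hgt
      have b2u := PySem.Int.mod_lt (a := y) hgt
      rcases abs_cases (PySem.Int.mod y m - PySem.Int.mod x m) with ⟨he, _⟩ | ⟨he, _⟩ <;>
        rcases abs_cases m with ⟨hm2, _⟩ | ⟨hm2, _⟩ <;> omega
  have h0 := Int.eq_zero_of_abs_lt_dvd hd' hbound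
  omega

lemma powMod_modEq (b : Int) (e : Nat) (m : Int) : Int.ModEq m (PySem.Int.powMod b e m) (b ^ e) := by
  simpa [PySem.Int.powMod] using pymod_modEq (b ^ e) m

-- The exact (un-reduced) value of A's loop sum, same recursion structure as loopT.
def Sx (N : Int) (e : Nat) : Int :=
  if _h : (10:Int) ^ e ≤ N then
    (min ((10:Int) ^ (e + 1) - 1) N - (10:Int) ^ e + 1) * (10:Int) ^ (e + 1) + Sx N (e + 1)
  else 0
termination_by (N + 1 - (10:Int) ^ e).toNat
decreasing_by
  have h1 : (1:Int) ≤ (10:Int) ^ e := one_le_pow₀ (by norm_num)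
  have h2 : (10:Int) ^ (e + 1) = 10 * (10:Int) ^ e := by ring
  omega

-- A's loop accumulates, mod m, exactly the tail sum Sx.
lemma loopT_modEq (N m : Int) (e : Nat) (T : Int) :
    Int.ModEq m (loopT N m e T) (T + Sx N e) := by
  fun_induction loopT N m e T with
  | case1 e T h ih =>
    rw [Sx, dif_pos h]
    refine ih.trans ?_
    have hc : Int.ModEq m
        (PySem.Int.mod (T + PySem.Int.mod (min ((10:Int) ^ (e + 1) - 1) N - (10:Int) ^ e + 1) m * PySem.Int.powMod 10 (e + 1) m) m)
        (T + (min ((10:Int) ^ (e + 1) - 1) N - (10:Int) ^ e + 1) * (10:Int) ^ (e + 1)) :=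
      (pymod_modEq _ m).trans
        (Int.ModEq.add_left T ((pymod_modEq _ m).mul (powMod_modEq 10 (e + 1) m)))
    have h2 := hc.add_right (Sx N (e + 1))
    calc _ ≡ (T + (min ((10:Int) ^ (e + 1) - 1) N - (10:Int) ^ e + 1) * (10:Int) ^ (e + 1)) + Sx N (e + 1) [ZMOD m] := h2
      _ = T + ((min ((10:Int) ^ (e + 1) - 1) N - (10:Int) ^ e + 1) * (10:Int) ^ (e + 1) + Sx N (e + 1)) := by ring
  | case2 e T h =>
    rw [Sx, dif_neg h, add_zero]

-- B's digit-count loop yields the decimal-digit bracket of N.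
lemma loopD_spec (N : Int) (e : Nat) :
    (10:Int) ^ (e - 1) ≤ N → 1 ≤ e →
    1 ≤ loopD N e ∧ (10:Int) ^ (loopD N e - 1) ≤ N ∧ N < (10:Int) ^ (loopD N e) := by
  fun_induction loopD N e with
  | case1 e h ih =>
    intro _ h1
    exact ih (by simpa using h) (by omega)
  | case2 e h =>
    intro he h1
    exact ⟨h1, he, lt_of_not_ge h⟩

lemma hundred_pow (e : Nat) : (100:Int) ^ e = 10 ^ e * 10 ^ e := by
  rw [show (100:Int) = 10 * 10 by norm_num, mul_pow]

-- Closed form for Sx on the digit bracket of N.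
lemma Sx_closed (N : Int) (D : Nat) (hD1 : (10:Int) ^ (D - 1) ≤ N) (hD2 : N < (10:Int) ^ D) :
    ∀ e, e < D →
      99 * Sx N e = 90 * ((100:Int) ^ (D - 1) - 100 ^ e) + 99 * ((N - (10:Int) ^ (D - 1) + 1) * (10:Int) ^ D) := by
  intro e
  fun_induction Sx N e with
  | case1 e h ih =>
    intro heD
    by_cases hlast : e + 1 = D
    · have hDe : D - 1 = e := by omega
      have hSxD : Sx N (e + 1) = 0 := by
        rw [Sx, dif_neg]; rw [hlast]; exact not_le.mpr hD2
      have hmin : min ((10:Int) ^ (e + 1) - 1) N = N := by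
        have : N ≤ (10:Int) ^ (e + 1) - 1 := by rw [hlast]; omega
        exact min_eq_right this
      rw [hSxD, hmin, hDe, hlast]
      ring
    · have he1D : e + 1 < D := by omega
      have hp1 : (10:Int) ^ (e + 1) ≤ 10 ^ (D - 1) :=
        pow_le_pow_right₀ (by norm_num) (by omega)
      have hmin : min ((10:Int) ^ (e + 1) - 1) N = (10:Int) ^ (e + 1) - 1 := by
        have : (10:Int) ^ (e + 1) - 1 ≤ N := by omega
        exact min_eq_left this
      have ihv := ih he1D
      rw [hmin, mul_add, ihv]
      have h10 : (10:Int) ^ (e + 1) = 10 * 10 ^ e := by ring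
      have h100a : (100:Int) ^ (e + 1) = 10 ^ (e + 1) * 10 ^ (e + 1) := hundred_pow (e + 1)
      have h100b : (100:Int) ^ e = 10 ^ e * 10 ^ e := hundred_pow e
      nlinarith [h100a, h100b, h10]
  | case2 e h =>
    intro heD
    exfalso
    have : (10:Int) ^ e ≤ 10 ^ (D - 1) := pow_le_pow_right₀ (by norm_num) (by omega)
    omega

lemma Sx_neg (N : Int) (h : N < 1) : Sx N 0 = 0 := by
  rw [Sx, dif_neg]
  rw [pow_zero]; omega

-- 99 divides 100^k - 1, so B's floor division is exact.
lemma full_mul (k : Nat) :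
    PySem.Int.floordiv (90 * ((100:Int) ^ k - 1)) 99 * 99 = 90 * ((100:Int) ^ k - 1) := by
  have hdvd : (99:Int) ∣ 90 * ((100:Int) ^ k - 1) := by
    refine Dvd.dvd.mul_left ?_ 90
    simpa using sub_dvd_pow_sub_pow (100:Int) 1 k
  have hm : PySem.Int.mod (90 * ((100:Int) ^ k - 1)) 99 = 0 :=
    (PySem.Int.mod_eq_zero_iff_dvd _ _).mpr hdvd
  have h := PySem.Int.floordiv_mul_add_mod (90 * ((100:Int) ^ k - 1)) 99
  omega

-- ===== VERDICT (by name: the statement is the Claim_ definition above) =====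
theorem solve_formula_mod_spec : Claim_equal_solve_formula_mod := by
  intro N m _ hpre
  obtain ⟨hm, _⟩ := hpre
  show _ = _
  unfold solve_formula_mod solve_formula_mod_alt
  set s := PySem.Int.mod (PySem.Int.mod (PySem.Int.mod N m * PySem.Int.mod (N + 1) m) m * pyPow2Inv m) m with hs
  have hA : Int.ModEq m (loopT N m 0 0) (Sx N 0) := by
    simpa using loopT_modEq N m 0 0
  have hB : Int.ModEq m
      (if 1 ≤ N then
        PySem.Int.mod (PySem.Int.floordiv (90 * ((100:Int) ^ (loopD N 1 - 1) - 1)) 99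
          + (N - (10:Int) ^ (loopD N 1 - 1) + 1) * (10:Int) ^ (loopD N 1)) m
      else 0) (Sx N 0) := by
    by_cases hN : 1 ≤ N
    · rw [if_pos hN]
      obtain ⟨hD0, hD1, hD2⟩ := loopD_spec N 1 (by simpa using hN) le_rfl
      have hclosed := Sx_closed N (loopD N 1) hD1 hD2 0 hD0
      have hfull := full_mul (loopD N 1 - 1)
      have hval : PySem.Int.floordiv (90 * ((100:Int) ^ (loopD N 1 - 1) - 1)) 99
          + (N - (10:Int) ^ (loopD N 1 - 1) + 1) * (10:Int) ^ (loopD N 1) = Sx N 0 := by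
        have h99 : (99:Int) ≠ 0 := by norm_num
        apply mul_left_cancel₀ h99
        rw [pow_zero] at hclosed
        nlinarith [hclosed, hfull]
      rw [hval]
      exact pymod_modEq _ m
    · rw [if_neg hN, Sx_neg N (by omega)]
  have hcore : Int.ModEq m (s * loopT N m 0 0 + PySem.Int.mod N m * s)
      (s * (if 1 ≤ N then
        PySem.Int.mod (PySem.Int.floordiv (90 * ((100:Int) ^ (loopD N 1 - 1) - 1)) 99
          + (N - (10:Int) ^ (loopD N 1 - 1) + 1) * (10:Int) ^ (loopD N 1)) m
      else 0) + PySem.Int.mod N m * s) := by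
    exact Int.ModEq.add_right _ ((hA.trans hB.symm).mul_left s)
  have hfin := pymod_congr hm hcore
  exact hfin.trans (by congr 1; ring)
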